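-- pv_equiv track=rewrite | github.com/mmb84-aub/Q-Trial | frontend/components/__init__.py | _build_stage_states
-- ===== SOURCE A (Python) =====
-- PIPELINE_STAGES = [
--     {"key": "StaticAnalysis",   "label": "Static Analysis"},
--     {"key": "dataset",          "label": "Evidence & Guardrails"},
--     {"key": "plan",             "label": "Planner"},
--     {"key": "DataQualityAgent", "label": "Data Quality"},
--     {"key": "ClinicalSemanticsAgent", "label": "Clinical Semantics"},
--     {"key": "UnknownsAgent",    "label": "Unknowns"},
--     {"key": "InsightSynthesisAgent", "label": "Insight Synthesis"},
--     {"key": "judge",            "label": "Judge"},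
--     {"key": "reasoning",        "label": "Reasoning Engine"},
--     {"key": "hypotheses",       "label": "Hypotheses"},
--     {"key": "dispatch",         "label": "Tool Dispatch"},
--     {"key": "literature",       "label": "Literature RAG"},
-- ]
--
-- def _build_stage_states(completed_stages: list[str]) -> list[dict[str, str]]:
--     """Map completed stage keys → state (done/active/pending) for each stage."""
--     completed_set = set(completed_stages)
--     stages = []
--     found_first_pending = False
--     for s in PIPELINE_STAGES:
--         if s["key"] in completed_set:
--             stages.append({"label": s["label"], "state": "done"})
--         elif not found_first_pending:
--             stages.append({"label": s["label"], "state": "active"})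
--             found_first_pending = True
--         else:
--             stages.append({"label": s["label"], "state": "pending"})
--     return stages
-- ===== SOURCE B (Python) =====
-- PIPELINE_STAGES = [
--     {"key": "StaticAnalysis",   "label": "Static Analysis"},
--     {"key": "dataset",          "label": "Evidence & Guardrails"},
--     {"key": "plan",             "label": "Planner"},
--     {"key": "DataQualityAgent", "label": "Data Quality"},
--     {"key": "ClinicalSemanticsAgent", "label": "Clinical Semantics"},
--     {"key": "UnknownsAgent",    "label": "Unknowns"},
--     {"key": "InsightSynthesisAgent", "label": "Insight Synthesis"},
--     {"key": "judge",            "label": "Judge"},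
--     {"key": "reasoning",        "label": "Reasoning Engine"},
--     {"key": "hypotheses",       "label": "Hypotheses"},
--     {"key": "dispatch",         "label": "Tool Dispatch"},
--     {"key": "literature",       "label": "Literature RAG"},
-- ]
--
-- def _build_stage_states(completed_stages: list[str]) -> list[dict[str, str]]:
--     completed_set = set(completed_stages)
--     pivot = next((i for i, s in enumerate(PIPELINE_STAGES)
--                   if s["key"] not in completed_set), None)
--     return [
--         {"label": s["label"],
--          "state": "done" if s["key"] in completed_set
--                   else ("active" if i == pivot else "pending")}
--         for i, s in enumerate(PIPELINE_STAGES)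
--     ]
-- ===== Notes on version B (the rewrite author's own statement) =====
-- stated objective: alternative
-- what changed: B replaces A's running found_first_pending flag with a separately precomputed pivot index (the first stage whose key is not completed) and classifies each stage independently by index in one comprehension.
import Mathlib
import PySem

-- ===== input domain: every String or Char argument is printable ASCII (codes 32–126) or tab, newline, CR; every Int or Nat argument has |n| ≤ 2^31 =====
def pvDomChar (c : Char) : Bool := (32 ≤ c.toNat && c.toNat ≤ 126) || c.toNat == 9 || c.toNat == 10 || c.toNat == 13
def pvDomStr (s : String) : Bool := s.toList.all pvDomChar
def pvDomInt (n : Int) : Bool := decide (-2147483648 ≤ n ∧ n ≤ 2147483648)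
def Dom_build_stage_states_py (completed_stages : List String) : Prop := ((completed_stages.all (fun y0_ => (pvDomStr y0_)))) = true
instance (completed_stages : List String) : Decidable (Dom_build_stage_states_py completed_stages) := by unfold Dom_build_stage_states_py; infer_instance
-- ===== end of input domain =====

-- B computes the "active" boundary as a precomputed pivot index instead of A's running flag;
-- objective: alternative decomposition (same cost).

-- PIPELINE_STAGES as (key, label) pairs (shared module constant)
def pvStages : List (String × String) := [
  ("StaticAnalysis",   "Static Analysis"),
  ("dataset",          "Evidence & Guardrails"),
  ("plan",             "Planner"),
  ("DataQualityAgent", "Data Quality"),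
  ("ClinicalSemanticsAgent", "Clinical Semantics"),
  ("UnknownsAgent",    "Unknowns"),
  ("InsightSynthesisAgent", "Insight Synthesis"),
  ("judge",            "Judge"),
  ("reasoning",        "Reasoning Engine"),
  ("hypotheses",       "Hypotheses"),
  ("dispatch",         "Tool Dispatch"),
  ("literature",       "Literature RAG")]

-- ===== PORT A =====
-- A's loop: running flag found_first_pending
def pvGoA (cset : PySem.Set String) : List (String × String) → Bool → List (List (String × String))
  | [], _ => []
  | s :: rest, flag =>
    if PySem.Set.contains cset s.1 then
      [("label", s.2), ("state", "done")] :: pvGoA cset rest flag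
    else if !flag then
      [("label", s.2), ("state", "active")] :: pvGoA cset rest true
    else
      [("label", s.2), ("state", "pending")] :: pvGoA cset rest flag

def build_stage_states_py (completed_stages : List String) : List (List (String × String)) :=
  let completed_set := PySem.Set.ofList completed_stages
  pvGoA completed_set pvStages false

-- ===== PORT B =====
-- B: classify one enumerated stage given the precomputed pivot
def pvClassify (cset : PySem.Set String) (pivot : Option Int) (p : Int × (String × String)) :
    List (String × String) :=
  [("label", p.2.2),
   ("state", if PySem.Set.contains cset p.2.1 then "done"
             else if some p.1 = pivot then "active" else "pending")]

def build_stage_states_py_alt (completed_stages : List String) : List (List (String × String)) :=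
  let completed_set := PySem.Set.ofList completed_stages
  let pivot : Option Int :=
    ((PySem.List.enumerate pvStages 0).find?
      (fun p => !(PySem.Set.contains completed_set p.2.1))).map (·.1)
  (PySem.List.enumerate pvStages 0).map (pvClassify completed_set pivot)

-- ===== PRECONDITION & SPEC =====
def Spec_build_stage_states_py (completed_stages : List String) (out : List (List (String × String))) : Prop := out = build_stage_states_py_alt completed_stages
instance (completed_stages : List String) (out : List (List (String × String))) : Decidable (Spec_build_stage_states_py completed_stages out) := by unfold Spec_build_stage_states_py; infer_instance

-- ===== CLAIM (what is proved, stated in full; the proofs are below) =====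
def Claim_equal_build_stage_states_py : Prop := ∀ (completed_stages : List String), Dom_build_stage_states_py completed_stages → Spec_build_stage_states_py completed_stages (build_stage_states_py completed_stages)

-- ===== LEMMAS AND PROOFS =====

-- once the active slot has been passed (flag = true), A emits done/pending only,
-- which is B's classification with pivot = none
theorem pvGoA_true (cset : PySem.Set String) :
    ∀ (l : List (String × String)) (k : Int),
      pvGoA cset l true = (PySem.List.enumerate l k).map (pvClassify cset none) := by
  intro l
  induction l with
  | nil => intro k; simp [pvGoA, PySem.List.enumerate_nil]
  | cons s rest ih =>
    intro k
    by_cases h : s.1 ∈ cset <;>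
      simp [pvGoA, PySem.List.enumerate_cons, pvClassify, PySem.Set.contains, h, ih (k + 1)]

-- classification with pivot (some m) agrees with pivot none on indices all greater than m
theorem pvClassify_gt (cset : PySem.Set String) (m : Int) :
    ∀ (l : List (String × String)) (k : Int), m < k →
      (PySem.List.enumerate l k).map (pvClassify cset (some m))
        = (PySem.List.enumerate l k).map (pvClassify cset none) := by
  intro l
  induction l with
  | nil => intro k _; simp [PySem.List.enumerate_nil]
  | cons s rest ih =>
    intro k hk
    simp only [PySem.List.enumerate_cons, List.map_cons, pvClassify]
    have hne : ¬ (some k = some m) := by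
      intro h; injection h with h'; omega
    rw [ih (k + 1) (by omega)]
    simp [hne]

-- main invariant: A's flag = false state equals B's classification with the pivot
-- computed as the first not-completed entry of the (enumerated) remaining list
theorem pvGoA_false (cset : PySem.Set String) :
    ∀ (l : List (String × String)) (k : Int),
      pvGoA cset l false
        = (PySem.List.enumerate l k).map
            (pvClassify cset
              (((PySem.List.enumerate l k).find?
                  (fun p => !(PySem.Set.contains cset p.2.1))).map (·.1))) := by
  intro l
  induction l with
  | nil => intro k; simp [pvGoA, PySem.List.enumerate_nil]
  | cons s rest ih =>
    intro k
    simp only [pvGoA, PySem.List.enumerate_cons]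
    by_cases h : s.1 ∈ cset
    · rw [List.find?_cons_of_neg (by simp [PySem.Set.contains, h])]
      simp only [pvGoA, List.map_cons, pvClassify, PySem.Set.contains]
      rw [ih (k + 1)]
      simp [h]
    · rw [List.find?_cons_of_pos (by simp [PySem.Set.contains, h])]
      simp only [pvGoA, Option.map_some, List.map_cons, pvClassify, PySem.Set.contains]
      rw [pvGoA_true cset rest (k + 1), ← pvClassify_gt cset k rest (k + 1) (by omega)]
      simp [h]

-- ===== VERDICT (by name: the statement is the Claim_ definition above) =====
theorem build_stage_states_py_spec : Claim_equal_build_stage_states_py := by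
  intro completed_stages _
  unfold Spec_build_stage_states_py build_stage_states_py build_stage_states_py_alt
  exact pvGoA_false (PySem.Set.ofList completed_stages) pvStages 0
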